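-- pv_equiv track=rewrite | github.com/TimVan1596/ACM-ICPC | python/course/educoder/函数/使用递归.py | abs_sum
-- ===== SOURCE A (Python) =====
-- def abs_sum(L):
-- #请在此添加代码，以递归的方式设计函数abs_sum(L)返回列表L（假设其中全是整数）中所有整数绝对值之和
-- #********** Begin *********#
--     if len(L) <= 0:
--         return 0
--     import math
--     temp = abs(int(L.pop()))
--     total = 0
--     total = temp + abs_sum(L)
--     return total
-- ===== SOURCE B (Python) =====
-- def abs_sum(L):
--     total = 0
--     while L:
--         total += abs(int(L.pop()))
--     return total
-- ===== Notes on version B (the rewrite author's own statement) =====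
-- stated objective: simpler
-- what changed: Replaces the recursion (pop last, recurse on the rest) with an iterative while-loop over an accumulator, avoiding O(n) call depth; both empty L in place.
import Mathlib
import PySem

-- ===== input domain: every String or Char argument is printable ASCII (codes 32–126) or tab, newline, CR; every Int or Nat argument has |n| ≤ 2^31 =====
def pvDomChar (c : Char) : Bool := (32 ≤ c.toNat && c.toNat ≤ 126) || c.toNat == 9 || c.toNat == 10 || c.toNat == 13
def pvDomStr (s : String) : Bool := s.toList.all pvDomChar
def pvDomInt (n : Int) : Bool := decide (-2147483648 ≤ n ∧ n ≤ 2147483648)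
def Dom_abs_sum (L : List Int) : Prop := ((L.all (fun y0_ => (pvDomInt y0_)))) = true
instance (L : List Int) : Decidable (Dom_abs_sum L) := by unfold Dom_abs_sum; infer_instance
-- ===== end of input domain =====

-- B replaces A's recursion by an iterative accumulator loop (same end-popping, L is emptied in place
-- by both Pythons; the equivalence proved here is about the return value).

-- ===== PORT A =====
-- A: if len(L) <= 0: return 0; temp = abs(int(L.pop())); return temp + abs_sum(L)
def abs_sum (L : List Int) : Int :=
  if L.length ≤ 0 then 0
  else
    match h : L.getLast? with
    | none => 0   -- unreachable: L nonempty
    | some temp => |temp| + abs_sum L.dropLast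
termination_by L.length
decreasing_by
  cases L with
  | nil => simp at *
  | cons a t => simp [List.length_dropLast]

-- ===== PORT B =====
-- B: total = 0; while L: total += abs(int(L.pop())); return total
def absSumLoop (L : List Int) (total : Int) : Int :=
  match h : L.getLast? with
  | none => total
  | some x => absSumLoop L.dropLast (total + |x|)
termination_by L.length
decreasing_by
  cases L with
  | nil => simp at h
  | cons a t => simp [List.length_dropLast]

def abs_sum_alt (L : List Int) : Int := absSumLoop L 0

-- ===== PRECONDITION & SPEC =====
def Spec_abs_sum (L : List Int) (out : Int) : Prop := out = abs_sum_alt L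
instance (L : List Int) (out : Int) : Decidable (Spec_abs_sum L out) := by unfold Spec_abs_sum; infer_instance

-- ===== CLAIM (what is proved, stated in full; the proofs are below) =====
def Claim_equal_abs_sum : Prop := ∀ (L : List Int), Dom_abs_sum L → Spec_abs_sum L (abs_sum L)

-- ===== LEMMAS AND PROOFS =====
theorem abs_sum_concat (l : List Int) (a : Int) : abs_sum (l ++ [a]) = |a| + abs_sum l := by
  rw [abs_sum.eq_def, if_neg (by simp)]
  split
  next h => simp at h
  next temp h =>
    simp only [List.getLast?_concat, Option.some.injEq] at h
    subst h
    simp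

theorem absSumLoop_concat (l : List Int) (a : Int) (t : Int) :
    absSumLoop (l ++ [a]) t = absSumLoop l (t + |a|) := by
  rw [absSumLoop.eq_def]
  split
  next h => simp at h
  next x h =>
    simp only [List.getLast?_concat, Option.some.injEq] at h
    subst h
    simp

theorem abs_sum_eq_loop (L : List Int) : ∀ t, abs_sum L + t = absSumLoop L t := by
  induction L using List.reverseRecOn with
  | nil => intro t; rw [abs_sum.eq_def, absSumLoop.eq_def]; simp
  | append_singleton l a ih =>
      intro t
      rw [abs_sum_concat, absSumLoop_concat, ← ih]
      ring

-- ===== VERDICT (by name: the statement is the Claim_ definition above) =====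
theorem abs_sum_spec : Claim_equal_abs_sum := by
  intro L _
  unfold Spec_abs_sum abs_sum_alt
  rw [← abs_sum_eq_loop L 0, add_zero]
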